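-- pv_equiv track=rewrite | github.com/f1rset/Filler_VM_f1rset_bot | bot_cover3.py | figure_offset
-- ===== SOURCE A (Python) =====
-- def figure_offset(lst: list, important: str) -> list:
--     y_off = 0
--     x_off = 0
--     for i, _ in enumerate(lst):
--         if lst[i] == len(lst[i])*["."]:
--             y_off += 1
--         else:
--             break
--     for k, _ in enumerate(lst[0]):
--         for i, _ in enumerate(lst):
--             if lst[i][k] == important:
--                 break
--         else:
--             for i, _ in enumerate(lst):
--                 x_off += 1
--     return y_off, x_off
-- ===== SOURCE B (Python) =====
-- def figure_offset(lst: list, important: str) -> list: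
--     rows = len(lst)
--     cols = len(lst[0])
--     cols_with_imp = set()
--     for row in lst:
--         for k in range(cols):
--             if row[k] == important:
--                 cols_with_imp.add(k)
--     x_off = (cols - len(cols_with_imp)) * rows
--     y_off = 0
--     for row in lst:
--         if any(c != "." for c in row):
--             break
--         y_off += 1
--     return y_off, x_off
-- ===== Notes on version B (the rewrite author's own statement) =====
-- stated objective: alternative
-- what changed: Replaces A's column-major nested scan with for-else and an extra count loop by a single row-major pass maintaining a set of columns containing `important`, then computes x_off as (cols - len(set)) * rows in closed form; y_off is counted by a separate leading-run scan.
-- outside the precondition, e.g. on figure_offset([['X'], []], 'X'): A returns (0, 0), B raises IndexError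
import Mathlib
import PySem

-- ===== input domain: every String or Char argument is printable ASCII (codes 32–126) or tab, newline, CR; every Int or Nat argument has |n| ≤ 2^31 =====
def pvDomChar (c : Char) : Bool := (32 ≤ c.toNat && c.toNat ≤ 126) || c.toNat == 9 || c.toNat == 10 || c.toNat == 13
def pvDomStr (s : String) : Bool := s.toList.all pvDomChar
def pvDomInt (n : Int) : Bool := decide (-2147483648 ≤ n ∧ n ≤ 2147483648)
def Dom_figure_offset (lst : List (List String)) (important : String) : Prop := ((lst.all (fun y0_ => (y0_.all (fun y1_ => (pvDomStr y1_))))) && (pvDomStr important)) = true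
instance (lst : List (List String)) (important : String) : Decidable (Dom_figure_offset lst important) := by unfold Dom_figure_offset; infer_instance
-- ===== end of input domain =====

-- B replaces A's column-major for-else scan by one row-major pass into a set of
-- columns containing `important`, then x_off = (cols - len(set)) * rows (objective: alternative).

-- ===== PORT A =====
-- first loop of A: count leading rows equal to len(row)*["."], break at the first other row
def figOffYA : List (List String) → Int
  | [] => 0
  | row :: rest => if row = List.replicate row.length "." then 1 + figOffYA rest else 0

def figure_offset (lst : List (List String)) (important : String) : Int × Int :=
  let y_off := figOffYA lst
  -- for k,_ in enumerate(lst[0]); lst[i][k] via pyGetD (in range under Pre_)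
  let x_off : Int := (List.range (lst.headD []).length).foldl
    (fun acc k =>
      if lst.any (fun row => PySem.List.pyGetD row (Int.ofNat k) "" = important) then acc
      else lst.foldl (fun a _ => a + 1) acc)
    0
  (y_off, x_off)

-- ===== PORT B =====
-- y_off loop of B: leading run of rows with no cell ≠ "."
def figOffYB : List (List String) → Int
  | [] => 0
  | row :: rest => if row.any (fun c => c ≠ ".") then 0 else 1 + figOffYB rest

def figure_offset_alt (lst : List (List String)) (important : String) : Int × Int :=
  let rows : Int := lst.length
  -- cols = len(lst[0]) is a length, so range(cols) = List.range cols; row[k] via pyGetD (in range under Pre_)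
  let cols : Nat := (lst.headD []).length
  let seen : PySem.Set Nat := lst.foldl
    (fun s row => (List.range cols).foldl
      (fun s k => if PySem.List.pyGetD row (Int.ofNat k) "" = important then PySem.Set.add s k else s) s)
    (PySem.Set.ofList [])
  let x_off : Int := ((cols : Int) - PySem.Set.len seen) * rows
  (figOffYB lst, x_off)

-- ===== PRECONDITION & SPEC =====
-- Pre_ excludes the inputs where Python raises IndexError: empty lst (lst[0]) and ragged
-- grids with a row shorter than the first (on some of those A still returns, when the
-- important cell is found earlier in the column; B raises there, so they stay excluded).
def Pre_figure_offset (lst : List (List String)) (important : String) : Prop :=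
  lst ≠ [] ∧ ∀ row ∈ lst, (lst.headD []).length ≤ row.length
instance (lst : List (List String)) (important : String) : Decidable (Pre_figure_offset lst important) := by unfold Pre_figure_offset; infer_instance
def pvWitness_figure_offset : List (List String) × String := ([[".", "."], ["X", "."]], "X")

def Spec_figure_offset (lst : List (List String)) (important : String) (out : Int × Int) : Prop := out = figure_offset_alt lst important
instance (lst : List (List String)) (important : String) (out : Int × Int) : Decidable (Spec_figure_offset lst important out) := by unfold Spec_figure_offset; infer_instance

-- ===== CLAIM (what is proved, stated in full; the proofs are below) =====
def Claim_equal_figure_offset : Prop := ∀ (lst : List (List String)) (important : String), Dom_figure_offset lst important → Pre_figure_offset lst important → Spec_figure_offset lst important (figure_offset lst important)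

-- ===== LEMMAS AND PROOFS =====

theorem figOffY_eq (l : List (List String)) : figOffYA l = figOffYB l := by
  induction l with
  | nil => rfl
  | cons row rest ih =>
    simp only [figOffYA, figOffYB, ih]
    by_cases h : row = List.replicate row.length "."
    · rw [if_pos h, if_neg]
      intro hany
      rcases List.any_eq_true.mp hany with ⟨c, hcmem, hcne⟩
      rw [h] at hcmem
      have hc' : c ≠ "." := by simpa using hcne
      exact hc' (List.eq_of_mem_replicate hcmem)
    · rw [if_neg h, if_pos]
      by_contra hn
      apply h
      have hall : ∀ c ∈ row, c = "." := by
        intro c hc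
        by_contra hne
        exact hn (List.any_eq_true.mpr ⟨c, hc, by simpa using hne⟩)
      exact List.eq_replicate_of_mem hall

theorem addPerRow (l : List (List String)) (a : Int) :
    l.foldl (fun a _ => a + 1) a = a + l.length := by
  induction l generalizing a with
  | nil => simp
  | cons x xs ih => simp [List.foldl, ih]; ring

theorem foldAconst (p : Nat → Bool) (c : Int) (ks : List Nat) (acc : Int) :
    ks.foldl (fun acc k => if p k then acc else acc + c) acc
      = acc + c * (ks.countP (fun k => !p k)) := by
  induction ks generalizing acc with
  | nil => simp
  | cons k ks ih =>
    simp only [List.foldl, List.countP_cons]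
    rw [ih]
    by_cases h : p k <;> simp [h] <;> push_cast <;> ring

theorem foldA (p : Nat → Bool) (lst : List (List String)) (ks : List Nat) (acc : Int) :
    ks.foldl (fun acc k => if p k then acc else lst.foldl (fun a _ => a + 1) acc) acc
      = acc + (lst.length : Int) * (ks.countP (fun k => !p k)) := by
  have hfun : (fun (acc : Int) (k : Nat) => if p k then acc else lst.foldl (fun a _ => a + 1) acc)
      = (fun acc k => if p k then acc else acc + (lst.length : Int)) := by
    funext acc k
    by_cases h : p k <;> simp [h, addPerRow]
  rw [hfun, foldAconst]

theorem innerMem (P : Nat → Prop) [DecidablePred P] (ks : List Nat) (s : PySem.Set Nat) (x : Nat) :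
    x ∈ ks.foldl (fun s k => if P k then PySem.Set.add s k else s) s
      ↔ x ∈ s ∨ (x ∈ ks ∧ P x) := by
  induction ks generalizing s with
  | nil => simp
  | cons k ks ih =>
    simp only [List.foldl]
    by_cases h : P k
    · rw [if_pos h, ih]
      simp only [PySem.Set.mem_add, List.mem_cons]
      constructor
      · rintro ((hs | rfl) | hk)
        · exact Or.inl hs
        · exact Or.inr ⟨Or.inl rfl, h⟩
        · exact Or.inr ⟨Or.inr hk.1, hk.2⟩
      · rintro (hs | ⟨(rfl | hk), hp⟩)
        · exact Or.inl (Or.inl hs)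
        · exact Or.inl (Or.inr rfl)
        · exact Or.inr ⟨hk, hp⟩
    · rw [if_neg h, ih]
      simp only [List.mem_cons]
      constructor
      · rintro (hs | hk)
        · exact Or.inl hs
        · exact Or.inr ⟨Or.inr hk.1, hk.2⟩
      · rintro (hs | ⟨(rfl | hk), hp⟩)
        · exact Or.inl hs
        · exact absurd hp h
        · exact Or.inr ⟨hk, hp⟩

theorem innerNodup (P : Nat → Prop) [DecidablePred P] (ks : List Nat) (s : PySem.Set Nat) (hs : s.Nodup) :
    (ks.foldl (fun s k => if P k then PySem.Set.add s k else s) s).Nodup := by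
  induction ks generalizing s with
  | nil => exact hs
  | cons k ks ih =>
    simp only [List.foldl]
    by_cases h : P k
    · rw [if_pos h]; exact ih _ (PySem.Set.nodup_add _ _ hs)
    · rw [if_neg h]; exact ih _ hs

theorem outerMem (Q : List String → Nat → Prop) [∀ r k, Decidable (Q r k)]
    (rs : List (List String)) (ks : List Nat) (s : PySem.Set Nat) (x : Nat) :
    x ∈ rs.foldl (fun s row => ks.foldl (fun s k => if Q row k then PySem.Set.add s k else s) s) s
      ↔ x ∈ s ∨ (x ∈ ks ∧ ∃ row ∈ rs, Q row x) := by
  induction rs generalizing s with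
  | nil => simp
  | cons r rs ih =>
    simp only [List.foldl]
    rw [ih, innerMem]
    simp only [List.mem_cons]
    constructor
    · rintro ((hs | ⟨hk, hq⟩) | ⟨hk, row, hrow, hq⟩)
      · exact Or.inl hs
      · exact Or.inr ⟨hk, r, Or.inl rfl, hq⟩
      · exact Or.inr ⟨hk, row, Or.inr hrow, hq⟩
    · rintro (hs | ⟨hk, row, (rfl | hrow), hq⟩)
      · exact Or.inl (Or.inl hs)
      · exact Or.inl (Or.inr ⟨hk, hq⟩)
      · exact Or.inr ⟨hk, row, hrow, hq⟩

theorem outerNodup (Q : List String → Nat → Prop) [∀ r k, Decidable (Q r k)]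
    (rs : List (List String)) (ks : List Nat) (s : PySem.Set Nat) (hs : s.Nodup) :
    (rs.foldl (fun s row => ks.foldl (fun s k => if Q row k then PySem.Set.add s k else s) s) s).Nodup := by
  induction rs generalizing s with
  | nil => exact hs
  | cons r rs ih => exact ih _ (innerNodup _ _ _ hs)

-- length of the seen set = number of columns containing important
theorem seenLen (Q : List String → Nat → Prop) [∀ r k, Decidable (Q r k)]
    (rs : List (List String)) (n : Nat) :
    (rs.foldl (fun s row => (List.range n).foldl
        (fun s k => if Q row k then PySem.Set.add s k else s) s) (PySem.Set.ofList [])).length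
      = (List.range n).countP (fun k => rs.any (fun row => decide (Q row k))) := by
  have hperm : (rs.foldl (fun s row => (List.range n).foldl
        (fun s k => if Q row k then PySem.Set.add s k else s) s) (PySem.Set.ofList [])).Perm
      ((List.range n).filter (fun k => rs.any (fun row => decide (Q row k)))) := by
    rw [List.perm_ext_iff_of_nodup
      (outerNodup _ _ _ _ (PySem.Set.nodup_ofList []))
      (List.Nodup.filter _ (List.nodup_range))]
    intro a
    rw [outerMem, List.mem_filter]
    simp [PySem.Set.mem_ofList]
  rw [hperm.length_eq]
  simp [List.countP_eq_length_filter]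

-- x components agree (no precondition needed: both ports are total with the same defaults)
theorem x_eq (lst : List (List String)) (important : String) :
    (figure_offset lst important).2 = (figure_offset_alt lst important).2 := by
  simp only [figure_offset, figure_offset_alt]
  set n := (lst.headD []).length with hn
  set p : Nat → Bool := fun k => lst.any (fun row => decide (PySem.List.pyGetD row (Int.ofNat k) "" = important)) with hp
  rw [foldA p lst (List.range n) 0]
  simp only [PySem.Set.len]
  rw [seenLen (fun row k => PySem.List.pyGetD row (Int.ofNat k) "" = important) lst n]
  have key : ∀ l : List Nat, l.countP (fun k => !p k) + l.countP p = l.length := by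
    intro l
    induction l with
    | nil => simp
    | cons a l ih => by_cases h : p a <;> simp [List.countP_cons, h] <;> omega
  have hcount := key (List.range n)
  rw [List.length_range] at hcount
  have hc : ((List.range n).countP (fun k => !p k) : Int)
      = (n : Int) - ((List.range n).countP p : Int) := by omega
  rw [hc]; push_cast; ring

-- ===== VERDICT (by name: the statement is the Claim_ definition above) =====
theorem figure_offset_spec : Claim_equal_figure_offset := by
  intro lst important _ _
  unfold Spec_figure_offset
  have hx := x_eq lst important
  have hy : (figure_offset lst important).1 = (figure_offset_alt lst important).1 := by
    simp [figure_offset, figure_offset_alt, figOffY_eq]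
  exact Prod.ext hy hx
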